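-- pv_equiv track=rewrite | github.com/huertasdanny/Learn | PiEtherMegaShield.py | join2
-- ===== SOURCE A (Python) =====
-- def join2(buffer, position=int):
--     toJoin=[]
--     newPosition=position
--     for i in range(position,position+2):
--         toJoin.append(buffer[newPosition])
--         newPosition+=1
--     union=int.from_bytes(toJoin,byteorder='little',signed=True)
--     return union
-- ===== SOURCE B (Python) =====
-- def join2(buffer, position):
--     # Recursive little-endian signed decoder: the last (most-significant) byte
--     # carries the sign (b-256 if b>=128), lower bytes add in unsigned.
--     def le_signed(bs):
--         if len(bs) == 1:
--             b = bs[0]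
--             return b - 256 if b >= 128 else b
--         return bs[0] + 256 * le_signed(bs[1:])
--     return le_signed([buffer[position], buffer[position + 1]])
-- ===== Notes on version B (the rewrite author's own statement) =====
-- stated objective: alternative
-- what changed: Replaces the append loop plus int.from_bytes (unsigned value then 16-bit two's-complement threshold test) with a recursive byte-wise decoder in which the most-significant byte alone is sign-corrected (b-256 if b>=128) and lower bytes are added in unsigned positionally.
import Mathlib
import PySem

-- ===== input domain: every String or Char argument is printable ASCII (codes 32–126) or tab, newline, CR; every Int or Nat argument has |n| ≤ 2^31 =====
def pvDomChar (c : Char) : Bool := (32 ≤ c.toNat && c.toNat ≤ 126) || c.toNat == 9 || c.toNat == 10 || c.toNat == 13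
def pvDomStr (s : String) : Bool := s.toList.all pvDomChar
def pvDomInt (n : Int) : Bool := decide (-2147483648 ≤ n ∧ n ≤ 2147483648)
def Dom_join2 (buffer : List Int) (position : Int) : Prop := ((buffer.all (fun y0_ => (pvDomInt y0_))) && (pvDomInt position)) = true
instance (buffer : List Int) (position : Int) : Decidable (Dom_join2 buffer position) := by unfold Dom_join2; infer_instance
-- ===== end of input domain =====

-- B decodes the two bytes recursively, sign-correcting only the most-significant byte (objective: alternative).

-- ===== PORT A =====
-- hand port of int.from_bytes(bs, 'little', signed=True); exact for lists of bytes 0..255 (Pre_ guarantees that)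
def intFromBytesLESigned (bs : List Int) : Int :=
  let u := bs.foldr (fun b acc => acc * 256 + b) 0
  if bs = [] then 0
  else if u ≥ 2 ^ (8 * bs.length - 1) then u - 2 ^ (8 * bs.length) else u

def join2 (buffer : List Int) (position : Int) : Int :=
  -- buffer[newPosition] ported with pyGetD (total form); Pre_ excludes the IndexError inputs
  let st := (PySem.List.pyRange position (position + 2) 1).foldl
    (fun (st : List Int × Int) (_ : Int) =>
      (st.1 ++ [PySem.List.pyGetD buffer st.2 0], st.2 + 1))
    ([], position)
  intFromBytesLESigned st.1

-- ===== PORT B =====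
-- recursive helper le_signed: last byte signed, lower bytes positional
def leSigned : List Int → Int
  | [] => 0            -- unreachable: always called with two bytes
  | [b] => if b ≥ 128 then b - 256 else b
  | b :: rest => b + 256 * leSigned rest

def join2_alt (buffer : List Int) (position : Int) : Int :=
  leSigned [PySem.List.pyGetD buffer position 0, PySem.List.pyGetD buffer (position + 1) 0]

-- ===== PRECONDITION & SPEC =====
-- Pre_ excludes exactly the inputs where A raises: an out-of-range index (IndexError) or an
-- indexed element outside 0..255 (ValueError from int.from_bytes).
def Pre_join2 (buffer : List Int) (position : Int) : Prop :=
  PySem.Raise.InRange buffer.length position ∧ PySem.Raise.InRange buffer.length (position + 1) ∧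
  0 ≤ PySem.List.pyGetD buffer position 0 ∧ PySem.List.pyGetD buffer position 0 ≤ 255 ∧
  0 ≤ PySem.List.pyGetD buffer (position + 1) 0 ∧ PySem.List.pyGetD buffer (position + 1) 0 ≤ 255
instance (buffer : List Int) (position : Int) : Decidable (Pre_join2 buffer position) := by
  unfold Pre_join2; infer_instance

def pvWitness_join2 : List Int × Int := ([1, 2], 0)

def Spec_join2 (buffer : List Int) (position : Int) (out : Int) : Prop := out = join2_alt buffer position
instance (buffer : List Int) (position : Int) (out : Int) : Decidable (Spec_join2 buffer position out) := by unfold Spec_join2; infer_instance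

-- ===== CLAIM (what is proved, stated in full; the proofs are below) =====
def Claim_equal_join2 : Prop := ∀ (buffer : List Int) (position : Int), Dom_join2 buffer position → Pre_join2 buffer position → Spec_join2 buffer position (join2 buffer position)

-- ===== LEMMAS AND PROOFS =====
theorem pyRange_two (p : Int) : PySem.List.pyRange p (p + 2) 1 = [p, p + 1] := by
  rw [PySem.List.pyRange_one_cons (by omega)]
  have h : p + 2 = (p + 1) + 1 := by ring
  rw [h, PySem.List.pyRange_one_singleton]

-- ===== VERDICT (by name: the statement is the Claim_ definition above) =====
theorem join2_spec : Claim_equal_join2 := by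
  intro buffer position _ hpre
  obtain ⟨h0, h1, ha0, ha1, hb0, hb1⟩ := hpre
  unfold Spec_join2 join2 join2_alt intFromBytesLESigned leSigned
  rw [pyRange_two]
  simp only [List.foldl, List.nil_append, List.cons_append, List.length_cons, List.length_nil]
  set a := PySem.List.pyGetD buffer position 0 with ha
  set b := PySem.List.pyGetD buffer (position + 1) 0 with hb
  simp only [List.foldr]
  norm_num
  split_ifs <;> simp_all [leSigned] <;> omega
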